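-- pv_equiv track=rewrite | github.com/etorresh/MarkovTweets | markovtweets/string_control.py | clean_blank_space
-- ===== SOURCE A (Python) =====
-- def clean_blank_space(string_input):
--     base = 0
--     clean_list = []
--     for _ in string_input:
--         # Prevents index out of range.
--         if base == len(string_input) - 1:
--             clean_list.append(string_input[base])
--             break
--         elif string_input[base] == " " and string_input[base + 1] == ".":
--             pass
--         elif string_input[base] == " " and string_input[base + 1] == " ":
--             pass
--         else:
--             clean_list.append(string_input[base])
--         base += 1
--     return "".join(clean_list)
-- ===== SOURCE B (Python) =====
-- def clean_blank_space(string_input):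
--     out = []
--     i, n = 0, len(string_input)
--     while i < n:
--         c = string_input[i]
--         if c != ' ':
--             out.append(c)
--             i += 1
--         else:
--             while i < n and string_input[i] == ' ':
--                 i += 1
--             if not (i < n and string_input[i] == '.'):
--                 out.append(' ')
--     return ''.join(out)
-- ===== Notes on version B (the rewrite author's own statement) =====
-- stated objective: alternative
-- what changed: Replaces A's per-character indexed scan with one-character lookahead by a run-length scan: maximal runs of spaces are consumed as a unit by an inner loop and each run is emitted as one space unless the run is followed by a period (or nothing extra for that case), non-space characters are copied directly.
import Mathlib
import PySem

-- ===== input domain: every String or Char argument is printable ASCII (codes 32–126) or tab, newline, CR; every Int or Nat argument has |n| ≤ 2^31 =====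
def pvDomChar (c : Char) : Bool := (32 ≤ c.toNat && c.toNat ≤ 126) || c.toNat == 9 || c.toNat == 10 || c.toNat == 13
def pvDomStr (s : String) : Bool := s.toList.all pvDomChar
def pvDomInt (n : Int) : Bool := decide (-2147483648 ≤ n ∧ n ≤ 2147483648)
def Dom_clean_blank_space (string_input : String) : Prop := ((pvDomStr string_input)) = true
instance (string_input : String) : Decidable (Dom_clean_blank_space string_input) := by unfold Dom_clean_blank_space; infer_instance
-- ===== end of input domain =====

-- B replaces A's per-character indexed scan with lookahead by a run-length scan:
-- maximal runs of spaces are consumed as a unit and emitted as one space unless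
-- followed by a period (objective: alternative; same O(n) cost).


-- ===== PORT A =====
-- the for-loop over the string's characters: 'iter' is what remains of the iterable,
-- 'base' the manual index, 'acc' = clean_list; 'break'/loop end return acc
def cbsGoA (full : List Char) (iter : List Char) (base : Nat) (acc : List Char) : List Char :=
  match iter with
  | [] => acc
  | _ :: rest =>
    if base = full.length - 1 then
      acc ++ [(PySem.List.pyGet? full (base : Int)).getD ' ']   -- index always in range here
    else if (PySem.List.pyGet? full (base : Int)).getD ' ' = ' ' ∧
            (PySem.List.pyGet? full ((base : Int) + 1)).getD ' ' = '.' then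
      cbsGoA full rest (base + 1) acc
    else if (PySem.List.pyGet? full (base : Int)).getD ' ' = ' ' ∧
            (PySem.List.pyGet? full ((base : Int) + 1)).getD ' ' = ' ' then
      cbsGoA full rest (base + 1) acc
    else
      cbsGoA full rest (base + 1) (acc ++ [(PySem.List.pyGet? full (base : Int)).getD ' '])

def clean_blank_space (string_input : String) : String :=
  String.mk (cbsGoA string_input.toList string_input.toList 0 [])

-- ===== PORT B =====
-- Source B's outer while over the suffix starting at i: a non-space char is copied and
-- the scan advances one position; a space starts the inner while, which consumes the
-- whole maximal run (dropWhile), after which one space is emitted unless the next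
-- character is a period.
def cbsGoB : List Char → List Char
  | [] => []
  | c :: t =>
    if c ≠ ' ' then c :: cbsGoB t
    else
      let rest := t.dropWhile (· = ' ')
      if rest.head? = some '.' then cbsGoB rest
      else ' ' :: cbsGoB rest
  termination_by l => l.length
  decreasing_by
    · simp
    · have := List.length_dropWhile_le (p := (· = ' ')) (l := t)
      simp; omega
    · have := List.length_dropWhile_le (p := (· = ' ')) (l := t)
      simp; omega

def clean_blank_space_alt (string_input : String) : String :=
  String.mk (cbsGoB string_input.toList)

-- ===== PRECONDITION & SPEC =====
def Spec_clean_blank_space (string_input : String) (out : String) : Prop := out = clean_blank_space_alt string_input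
instance (string_input : String) (out : String) : Decidable (Spec_clean_blank_space string_input out) := by unfold Spec_clean_blank_space; infer_instance

-- ===== CLAIM (what is proved, stated in full; the proofs are below) =====
def Claim_equal_clean_blank_space : Prop := ∀ (string_input : String), Dom_clean_blank_space string_input → Spec_clean_blank_space string_input (clean_blank_space string_input)

-- ===== LEMMAS AND PROOFS =====

-- reference characterisation: drop a space followed by space or period, keep everything else
def cbsClean : List Char → List Char
  | [] => []
  | [c] => [c]
  | c :: d :: t =>
    (if c = ' ' ∧ (d = ' ' ∨ d = '.') then [] else [c]) ++ cbsClean (d :: t)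

theorem cbsGoA_eq_clean (full : List Char) :
    ∀ (iter : List Char) (base : Nat) (acc : List Char),
      full.drop base = iter → cbsGoA full iter base acc = acc ++ cbsClean iter := by
  intro iter
  induction iter with
  | nil => intro base acc _; simp [cbsGoA, cbsClean]
  | cons c rest ih =>
    intro base acc hdrop
    have hbase : base < full.length := by
      by_contra h
      have : full.drop base = [] := List.drop_eq_nil_of_le (by omega)
      rw [this] at hdrop; exact (List.cons_ne_nil _ _ hdrop.symm)
    have hget : PySem.List.pyGet? full (base : Int) = some c := by
      rw [PySem.List.pyGet?_natCast]
      have : (full.drop base)[0]? = some c := by rw [hdrop]; rfl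
      rw [List.getElem?_drop] at this; simpa using this
    have hlen : (full.drop base).length = full.length - base := List.length_drop ..
    rw [hdrop] at hlen
    cases rest with
    | nil =>
      have hlast : base = full.length - 1 := by simp at hlen; omega
      rw [cbsGoA]
      rw [if_pos hlast, hget]
      simp [cbsClean]
    | cons d t =>
      have hne : ¬ base = full.length - 1 := by simp at hlen; omega
      have hget2 : PySem.List.pyGet? full ((base : Int) + 1) = some d := by
        have hcast : ((base : Int) + 1) = ((base + 1 : Nat) : Int) := by push_cast; ring
        rw [hcast, PySem.List.pyGet?_natCast]
        have hd1 : (full.drop base)[1]? = some d := by rw [hdrop]; rfl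
        rw [List.getElem?_drop] at hd1; simpa using hd1
      have hdrop' : full.drop (base + 1) = d :: t := by
        have h := List.tail_drop (l := full) (i := base)
        rw [hdrop] at h; simpa using h.symm
      rw [cbsGoA]
      simp only [hne, if_false, hget, hget2, Option.getD_some]
      by_cases h1 : c = ' ' ∧ d = '.'
      · rw [if_pos h1, ih _ acc hdrop']
        obtain ⟨rfl, rfl⟩ := h1
        simp [cbsClean]
      · rw [if_neg h1]
        by_cases h2 : c = ' ' ∧ d = ' '
        · rw [if_pos h2, ih _ acc hdrop']
          obtain ⟨rfl, rfl⟩ := h2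
          simp [cbsClean]
        · rw [if_neg h2, ih _ _ hdrop']
          have hk : ¬ (c = ' ' ∧ (d = ' ' ∨ d = '.')) := by tauto
          simp [cbsClean, hk, List.append_assoc]

-- how cbsClean treats a whole run of spaces: all spaces up to the end of the run are
-- dropped, then one space is kept unless the run is followed by a period
theorem cbsClean_space_run (t : List Char) :
    cbsClean (' ' :: t) =
      (if (t.dropWhile (· = ' ')).head? = some '.' then [] else [' '])
        ++ cbsClean (t.dropWhile (· = ' ')) := by
  induction t with
  | nil => simp [cbsClean]
  | cons d t' ih =>
    by_cases hd : d = ' '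
    · subst hd
      have h1 : cbsClean (' ' :: ' ' :: t') = cbsClean (' ' :: t') := by
        simp [cbsClean]
      rw [h1, ih]
      simp [List.dropWhile]
    · have hdw : (d :: t').dropWhile (· = ' ') = d :: t' := by
        simp [List.dropWhile, hd]
      rw [hdw]
      by_cases hdot : d = '.'
      · subst hdot; simp [cbsClean]
      · simp [cbsClean, hd, hdot]

theorem cbsGoB_eq_clean : ∀ (l : List Char), cbsGoB l = cbsClean l := by
  intro l
  induction hn : l.length using Nat.strong_induction_on generalizing l with
  | _ n ih =>
    match l with
    | [] => simp [cbsGoB, cbsClean]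
    | c :: t =>
      by_cases hc : c = ' '
      · subst hc
        rw [cbsClean_space_run, cbsGoB]
        have hlt : (t.dropWhile (· = ' ')).length < n := by
          have := List.length_dropWhile_le (p := (· = ' ')) (l := t)
          subst hn; simp; omega
        have hrec := ih _ hlt (t.dropWhile (· = ' ')) rfl
        simp only [ne_eq, not_true_eq_false, if_false]
        by_cases hdot : (t.dropWhile (· = ' ')).head? = some '.'
        · simp [hdot, hrec]
        · simp [hdot, hrec]
      · rw [cbsGoB, if_pos hc]
        have hlt : t.length < n := by subst hn; simp
        rw [ih _ hlt t rfl]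
        cases t with
        | nil => simp [cbsClean]
        | cons d t' =>
          have hcond : ¬ (c = ' ' ∧ (d = ' ' ∨ d = '.')) := by tauto
          simp [cbsClean, hcond]

-- ===== VERDICT (by name: the statement is the Claim_ definition above) =====
theorem clean_blank_space_spec : Claim_equal_clean_blank_space := by
  intro s _
  unfold Spec_clean_blank_space clean_blank_space clean_blank_space_alt
  rw [cbsGoA_eq_clean _ _ 0 [] (by simp), cbsGoB_eq_clean]
  simp
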